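-- pv_equiv track=rewrite | github.com/sweeney-th/DM-ML | SignatureProject/urlDraft.py | analyze_tweet
-- ===== SOURCE A (Python) =====
-- def analyze_tweet(tweet):
-- 	results = []
-- 	word_count = len([item for item in tweet.split(" ") if "http" not in item and '#' not in item])
-- 	hashtag_count = len([item for item in tweet.split(" ") if "#" in item])
-- 	url_count = len([item for item in tweet.split(" ") if "http" in item])
-- 	results.append(word_count)
-- 	results.append(hashtag_count)
-- 	results.append(url_count)
-- 	return results
-- ===== SOURCE B (Python) =====
-- def analyze_tweet(tweet):
--     word_count = hashtag_count = url_count = 0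
--     for item in tweet.split(" "):
--         has_tag = "#" in item
--         has_url = "http" in item
--         if has_tag:
--             hashtag_count += 1
--         if has_url:
--             url_count += 1
--         if not has_tag and not has_url:
--             word_count += 1
--     return [word_count, hashtag_count, url_count]
-- ===== Notes on version B (the rewrite author's own statement) =====
-- stated objective: alternative
-- what changed: Replaces three separate split-and-filter scans of the tweet tokens with a single split and one pass maintaining three counters.
import Mathlib
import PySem

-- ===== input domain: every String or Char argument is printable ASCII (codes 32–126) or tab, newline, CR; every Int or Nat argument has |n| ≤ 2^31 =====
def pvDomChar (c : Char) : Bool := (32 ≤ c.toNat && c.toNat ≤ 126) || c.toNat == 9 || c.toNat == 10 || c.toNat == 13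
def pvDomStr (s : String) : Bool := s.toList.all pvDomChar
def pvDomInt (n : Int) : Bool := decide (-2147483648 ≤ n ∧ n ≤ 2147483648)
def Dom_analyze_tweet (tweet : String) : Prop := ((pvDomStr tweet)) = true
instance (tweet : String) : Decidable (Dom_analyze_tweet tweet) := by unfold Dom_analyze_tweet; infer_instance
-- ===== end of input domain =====

-- B collapses A's three split-and-filter scans into a single split and one pass with three counters (objective: alternative, one pass instead of three).

-- ===== PORT A =====
def analyze_tweet (tweet : String) : List Int :=
  let results : List Int := []
  let word_count : Int :=
    ((((PySem.Str.split? tweet " ").getD []).filter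
      (fun item => !(PySem.Str.isIn "http" item) && !(PySem.Str.isIn "#" item))).length : Int)
  let hashtag_count : Int :=
    ((((PySem.Str.split? tweet " ").getD []).filter (fun item => PySem.Str.isIn "#" item)).length : Int)
  let url_count : Int :=
    ((((PySem.Str.split? tweet " ").getD []).filter (fun item => PySem.Str.isIn "http" item)).length : Int)
  let results := results ++ [word_count]
  let results := results ++ [hashtag_count]
  let results := results ++ [url_count]
  results

-- ===== PORT B =====
def analyze_tweet_alt (tweet : String) : List Int :=
  let counts :=
    ((PySem.Str.split? tweet " ").getD []).foldl
      (fun (acc : Int × Int × Int) item =>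
        let has_tag := PySem.Str.isIn "#" item
        let has_url := PySem.Str.isIn "http" item
        ((if !has_tag && !has_url then acc.1 + 1 else acc.1),
         (if has_tag then acc.2.1 + 1 else acc.2.1),
         (if has_url then acc.2.2 + 1 else acc.2.2)))
      (0, 0, 0)
  [counts.1, counts.2.1, counts.2.2]

-- ===== PRECONDITION & SPEC =====
def Spec_analyze_tweet (tweet : String) (out : List Int) : Prop := out = analyze_tweet_alt tweet
instance (tweet : String) (out : List Int) : Decidable (Spec_analyze_tweet tweet out) := by unfold Spec_analyze_tweet; infer_instance

-- ===== CLAIM (what is proved, stated in full; the proofs are below) =====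
def Claim_equal_analyze_tweet : Prop := ∀ (tweet : String), Dom_analyze_tweet tweet → Spec_analyze_tweet tweet (analyze_tweet tweet)

-- ===== LEMMAS AND PROOFS =====

-- The single fold of B computes the three counts A obtains by three filters.
theorem foldl_three_counts (l : List String) (w h u : Int) :
    l.foldl
      (fun (acc : Int × Int × Int) item =>
        let has_tag := PySem.Str.isIn "#" item
        let has_url := PySem.Str.isIn "http" item
        ((if !has_tag && !has_url then acc.1 + 1 else acc.1),
         (if has_tag then acc.2.1 + 1 else acc.2.1),
         (if has_url then acc.2.2 + 1 else acc.2.2)))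
      (w, h, u)
    = (w + ((l.filter (fun item => !(PySem.Str.isIn "http" item) && !(PySem.Str.isIn "#" item))).length : Int),
       h + ((l.filter (fun item => PySem.Str.isIn "#" item)).length : Int),
       u + ((l.filter (fun item => PySem.Str.isIn "http" item)).length : Int)) := by
  induction l generalizing w h u with
  | nil => simp
  | cons x xs ih =>
    simp only [List.foldl_cons, List.filter_cons]
    rw [ih]
    cases ht : PySem.Str.isIn "#" x <;> cases hu : PySem.Str.isIn "http" x <;>
      simp [Bool.and_comm] <;> omega

-- ===== VERDICT (by name: the statement is the Claim_ definition above) =====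
theorem analyze_tweet_spec : Claim_equal_analyze_tweet := by
  intro tweet _
  unfold Spec_analyze_tweet analyze_tweet analyze_tweet_alt
  rw [foldl_three_counts]
  simp
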